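-- pv_equiv track=rewrite | github.com/samtupy/nvgt | build/generate_timezone_table_from_tzdata.py | organize_by_region
-- ===== SOURCE A (Python) =====
-- def organize_by_region(timezone_list):
--     regions = {
--         'Base': [],
--         'Africa': [],
--         'America': [],
--         'Antarctica': [],
--         'Asia': [],
--         'Atlantic': [],
--         'Australia': [],
--         'Europe': [],
--         'Indian': [],
--         'Pacific': []
--     }
--
--     for tz_name, offset in timezone_list:
--         if tz_name in ['UTC', 'GMT', 'UCT', 'Universal', 'Zulu']:
--             regions['Base'].append((tz_name, offset))
--         elif tz_name.startswith('Africa/'):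
--             regions['Africa'].append((tz_name, offset))
--         elif tz_name.startswith('America/'):
--             regions['America'].append((tz_name, offset))
--         elif tz_name.startswith('Antarctica/'):
--             regions['Antarctica'].append((tz_name, offset))
--         elif tz_name.startswith('Asia/'):
--             regions['Asia'].append((tz_name, offset))
--         elif tz_name.startswith('Atlantic/'):
--             regions['Atlantic'].append((tz_name, offset))
--         elif tz_name.startswith('Australia/'):
--             regions['Australia'].append((tz_name, offset))
--         elif tz_name.startswith('Europe/'):
--             regions['Europe'].append((tz_name, offset))
--         elif tz_name.startswith('Indian/'):
--             regions['Indian'].append((tz_name, offset))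
--         elif tz_name.startswith('Pacific/'):
--             regions['Pacific'].append((tz_name, offset))
--
--     for region in regions:
--         regions[region].sort()
--
--     return regions
-- ===== SOURCE B (Python) =====
-- def organize_by_region(timezone_list):
--     def belongs(name, region):
--         if region == 'Base':
--             return name in ('UTC', 'GMT', 'UCT', 'Universal', 'Zulu')
--         return name.startswith(region + '/')
--     return {region: sorted(item for item in timezone_list if belongs(item[0], region))
--             for region in ('Base', 'Africa', 'America', 'Antarctica', 'Asia',
--                            'Atlantic', 'Australia', 'Europe', 'Indian', 'Pacific')}
-- ===== Notes on version B (the rewrite author's own statement) =====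
-- stated objective: simpler
-- what changed: B loops over the 10 region names and builds each bucket by filtering and sorting the input list directly (a dict comprehension with a belongs predicate, no mutable dict or elif chain); this is correct because the region predicates are mutually exclusive, so per-region filtering selects exactly what A's first-match chain routes to that bucket.
import Mathlib
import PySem

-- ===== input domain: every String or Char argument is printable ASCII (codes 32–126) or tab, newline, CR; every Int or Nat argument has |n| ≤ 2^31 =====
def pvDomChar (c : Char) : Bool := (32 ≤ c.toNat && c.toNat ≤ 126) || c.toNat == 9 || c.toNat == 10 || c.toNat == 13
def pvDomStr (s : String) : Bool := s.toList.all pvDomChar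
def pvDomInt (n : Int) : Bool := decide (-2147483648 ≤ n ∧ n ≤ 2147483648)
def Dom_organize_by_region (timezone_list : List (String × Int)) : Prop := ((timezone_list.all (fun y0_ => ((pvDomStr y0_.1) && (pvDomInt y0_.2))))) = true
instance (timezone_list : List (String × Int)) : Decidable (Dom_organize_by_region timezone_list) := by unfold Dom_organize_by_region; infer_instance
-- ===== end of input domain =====

-- B builds each bucket by filtering and sorting the input list once per region (a per-region
-- filter over an immutable key list), instead of A's single classifying pass into a mutable
-- dict followed by sorting each of the 10 buckets; same cost class, simpler decomposition.


-- ===== PORT A =====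
def organize_by_region (timezone_list : List (String × Int)) : List (String × List (String × Int)) :=
  let regions : PySem.Dict String (List (String × Int)) :=
    PySem.Dict.ofList [("Base", []), ("Africa", []), ("America", []), ("Antarctica", []),
      ("Asia", []), ("Atlantic", []), ("Australia", []), ("Europe", []), ("Indian", []), ("Pacific", [])]
  let regions := timezone_list.foldl (fun d p =>
    if p.1 ∈ ["UTC", "GMT", "UCT", "Universal", "Zulu"] then d.modify "Base" [] (· ++ [p])
    else if PySem.Str.startswith p.1 "Africa/" then d.modify "Africa" [] (· ++ [p])
    else if PySem.Str.startswith p.1 "America/" then d.modify "America" [] (· ++ [p])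
    else if PySem.Str.startswith p.1 "Antarctica/" then d.modify "Antarctica" [] (· ++ [p])
    else if PySem.Str.startswith p.1 "Asia/" then d.modify "Asia" [] (· ++ [p])
    else if PySem.Str.startswith p.1 "Atlantic/" then d.modify "Atlantic" [] (· ++ [p])
    else if PySem.Str.startswith p.1 "Australia/" then d.modify "Australia" [] (· ++ [p])
    else if PySem.Str.startswith p.1 "Europe/" then d.modify "Europe" [] (· ++ [p])
    else if PySem.Str.startswith p.1 "Indian/" then d.modify "Indian" [] (· ++ [p])
    else if PySem.Str.startswith p.1 "Pacific/" then d.modify "Pacific" [] (· ++ [p])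
    else d) regions
  -- second loop: for region in regions: regions[region].sort()  (tuple sort = lexicographic)
  let regions := regions.keys.foldl
    (fun d region => d.modify region [] (fun v => PySem.List.sorted v (fun x => toLex x) false)) regions
  regions.items

-- ===== PORT B =====
-- Source B's belongs(name, region)
def pvBelongs (name region : String) : Bool :=
  if region == "Base" then ["UTC", "GMT", "UCT", "Universal", "Zulu"].contains name
  else PySem.Str.startswith name (region ++ "/")

-- Source B's dict comprehension: one (region, sorted(filtered)) entry per region name
def organize_by_region_alt (timezone_list : List (String × Int)) : List (String × List (String × Int)) :=
  ["Base", "Africa", "America", "Antarctica", "Asia",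
   "Atlantic", "Australia", "Europe", "Indian", "Pacific"].map
    (fun region =>
      (region, PySem.List.sorted (timezone_list.filter (fun item => pvBelongs item.1 region))
        (fun x => toLex x) false))

-- ===== PRECONDITION & SPEC =====
def Spec_organize_by_region (timezone_list : List (String × Int)) (out : List (String × List (String × Int))) : Prop := out = organize_by_region_alt timezone_list
instance (timezone_list : List (String × Int)) (out : List (String × List (String × Int))) : Decidable (Spec_organize_by_region timezone_list out) := by unfold Spec_organize_by_region; infer_instance

-- ===== CLAIM (what is proved, stated in full; the proofs are below) =====
def Claim_equal_organize_by_region : Prop := ∀ (timezone_list : List (String × Int)), Dom_organize_by_region timezone_list → Spec_organize_by_region timezone_list (organize_by_region timezone_list)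

-- ===== LEMMAS AND PROOFS =====

def pvBaseNames : List String := ["UTC", "GMT", "UCT", "Universal", "Zulu"]
def pvRegionNames : List String :=
  ["Africa", "America", "Antarctica", "Asia", "Atlantic", "Australia", "Europe", "Indian", "Pacific"]
def pvK10 : List String := "Base" :: pvRegionNames

-- A's elif chain as a key function (first match wins)
def pvRegionOf (name : String) : Option String :=
  if name ∈ pvBaseNames then some "Base"
  else pvRegionNames.find? (fun region => PySem.Str.startswith name (region ++ "/"))

def pvGStep (d : PySem.Dict String (List (String × Int))) (p : String × Int) :
    PySem.Dict String (List (String × Int)) :=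
  match pvRegionOf p.1 with
  | some key => d.modify key [] (· ++ [p])
  | none => d

def pvD0 : PySem.Dict String (List (String × Int)) :=
  PySem.Dict.ofList (pvK10.map (fun key => (key, [])))

lemma pvStep_eq (d : PySem.Dict String (List (String × Int))) (p : String × Int) :
    (if p.1 ∈ ["UTC", "GMT", "UCT", "Universal", "Zulu"] then d.modify "Base" [] (· ++ [p])
    else if PySem.Str.startswith p.1 "Africa/" then d.modify "Africa" [] (· ++ [p])
    else if PySem.Str.startswith p.1 "America/" then d.modify "America" [] (· ++ [p])
    else if PySem.Str.startswith p.1 "Antarctica/" then d.modify "Antarctica" [] (· ++ [p])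
    else if PySem.Str.startswith p.1 "Asia/" then d.modify "Asia" [] (· ++ [p])
    else if PySem.Str.startswith p.1 "Atlantic/" then d.modify "Atlantic" [] (· ++ [p])
    else if PySem.Str.startswith p.1 "Australia/" then d.modify "Australia" [] (· ++ [p])
    else if PySem.Str.startswith p.1 "Europe/" then d.modify "Europe" [] (· ++ [p])
    else if PySem.Str.startswith p.1 "Indian/" then d.modify "Indian" [] (· ++ [p])
    else if PySem.Str.startswith p.1 "Pacific/" then d.modify "Pacific" [] (· ++ [p])
    else d) = pvGStep d p := by
  unfold pvGStep pvRegionOf pvBaseNames pvRegionNames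
  simp only [List.find?]
  split_ifs <;> simp_all

lemma pvRegionOf_mem {s k : String} (h : pvRegionOf s = some k) : k ∈ pvK10 := by
  unfold pvRegionOf at h
  unfold pvK10
  split_ifs at h with hb
  · simp_all
  · exact List.mem_cons_of_mem _ (List.mem_of_find?_eq_some h)

lemma pvLoop_getD (l : List (String × Int)) (d : PySem.Dict String (List (String × Int)))
    (c : String) :
    (l.foldl pvGStep d).getD c [] =
      d.getD c [] ++ l.filter (fun p => pvRegionOf p.1 == some c) := by
  induction l generalizing d with
  | nil => simp
  | cons a t ih =>
    simp only [List.foldl_cons, List.filter_cons]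
    rcases hr : pvRegionOf a.1 with _ | k
    · simp [pvGStep, hr, ih]
    · by_cases hkc : k = c
      · subst hkc
        simp [pvGStep, hr, ih]
      · have hck : ¬ c = k := fun h => hkc h.symm
        simp [pvGStep, hr, ih, PySem.Dict.getD_modify, hkc, hck]

lemma pvLoop_keys (l : List (String × Int)) (d : PySem.Dict String (List (String × Int)))
    (h : ∀ k ∈ pvK10, d.contains k = true) :
    (l.foldl pvGStep d).keys = d.keys := by
  induction l generalizing d with
  | nil => rfl
  | cons a t ih =>
    simp only [List.foldl_cons]
    rcases hr : pvRegionOf a.1 with _ | k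
    · rw [show pvGStep d a = d from by simp [pvGStep, hr]]
      exact ih d h
    · have hk : d.contains k = true := h k (pvRegionOf_mem hr)
      have hkeys : (pvGStep d a).keys = d.keys := by
        simp only [pvGStep, hr]
        rw [PySem.Dict.keys_modify, PySem.Dict.keys_insert_of_contains _ _ hk]
      rw [ih _ (fun k' hk' => by
        simp [pvGStep, hr, PySem.Dict.contains_modify, h k' hk'])]
      exact hkeys

lemma pvSortLoop_getD (f : List (String × Int) → List (String × Int))
    (ks : List String) (d : PySem.Dict String (List (String × Int))) (c : String)
    (hnd : ks.Nodup) :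
    (ks.foldl (fun d r => d.modify r [] f) d).getD c [] =
      if c ∈ ks then f (d.getD c []) else d.getD c [] := by
  induction ks generalizing d with
  | nil => simp
  | cons k t ih =>
    have hk : k ∉ t := (List.nodup_cons.mp hnd).1
    have hnd' : t.Nodup := (List.nodup_cons.mp hnd).2
    simp only [List.foldl_cons]
    rw [ih _ hnd']
    by_cases hct : c ∈ t
    · have hck : c ≠ k := fun h => hk (h ▸ hct)
      simp [hct, List.mem_cons, hck, PySem.Dict.getD_modify]
    · by_cases hck : c = k
      · subst hck; simp [hct]
      · simp [hct, hck, PySem.Dict.getD_modify]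

lemma pvSortLoop_keys (f : List (String × Int) → List (String × Int))
    (ks : List String) (d : PySem.Dict String (List (String × Int)))
    (h : ∀ k ∈ ks, d.contains k = true) :
    (ks.foldl (fun d r => d.modify r [] f) d).keys = d.keys := by
  induction ks generalizing d with
  | nil => rfl
  | cons k t ih =>
    have hk : d.contains k = true := h k List.mem_cons_self
    have hkeys : (d.modify k [] f).keys = d.keys := by
      rw [PySem.Dict.keys_modify, PySem.Dict.keys_insert_of_contains _ _ hk]
    simp only [List.foldl_cons]
    rw [ih _ (fun k' hk' => by
      simp [PySem.Dict.contains_modify, h k' (List.mem_cons_of_mem _ hk')])]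
    exact hkeys

lemma pvD0_keys : pvD0.keys = pvK10 := by decide
lemma pvK10_nodup : pvK10.Nodup := by decide
lemma pvD0_getD (c : String) : pvD0.getD c [] = [] := by
  have h : pvD0 = PySem.Dict.mk [("Base", []), ("Africa", []), ("America", []), ("Antarctica", []),
      ("Asia", []), ("Atlantic", []), ("Australia", []), ("Europe", []), ("Indian", []), ("Pacific", [])] := by
    decide
  rw [h, PySem.Dict.getD_eq_get?_getD]
  simp only [PySem.Dict.get?_mk_cons]
  split_ifs <;> rfl

-- two startswith prefixes of the same string are comparable; used for region exclusivity
lemma pv_sw_false {name a : String} (ha : PySem.Str.startswith name a = true) (b : String)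
    (h1 : ¬ a.toList <+: b.toList) (h2 : ¬ b.toList <+: a.toList) :
    PySem.Str.startswith name b = false := by
  cases hb : PySem.Str.startswith name b with
  | false => rfl
  | true =>
    exfalso
    rw [PySem.Str.startswith_eq] at ha hb
    have ha' : a.toList <+: name.toList := (PySem.Chars.startswith_iff _ _).1 ha
    have hb' : b.toList <+: name.toList := (PySem.Chars.startswith_iff _ _).1 hb
    rcases List.prefix_or_prefix_of_prefix ha' hb' with h | h
    · exact h1 h
    · exact h2 h

-- A's first-match key equals B's per-region predicate, for every one of the 10 keys:
-- the region predicates are mutually exclusive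
lemma pvRegionOf_eq_belongs (name k : String) (hk : k ∈ pvK10) :
    (pvRegionOf name == some k) = pvBelongs name k := by
  rw [Bool.eq_iff_iff, beq_iff_eq]
  constructor
  · intro h
    unfold pvRegionOf at h
    split_ifs at h with hb
    · cases Option.some.inj h
      unfold pvBelongs
      rw [if_pos (by decide)]
      revert hb; unfold pvBaseNames; simp
    · have hmem := List.mem_of_find?_eq_some h
      have hsw := List.find?_some h
      simp only at hsw
      have hne : k ≠ "Base" := by rintro rfl; revert hmem; decide
      unfold pvBelongs
      rw [if_neg (by simpa using hne)]
      exact hsw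
  · intro h
    unfold pvBelongs at h
    rcases List.mem_cons.mp (show k ∈ "Base" :: pvRegionNames from hk) with rfl | hk'
    · rw [if_pos (by decide)] at h
      have hm : name ∈ pvBaseNames := by revert h; unfold pvBaseNames; simp
      unfold pvRegionOf
      rw [if_pos hm]
    · have hne : k ≠ "Base" := by rintro rfl; revert hk'; decide
      rw [if_neg (by simpa using hne)] at h
      revert h
      fin_cases hk' <;> intro hsw
      · have hnb : name ∉ pvBaseNames := by
          intro hm; fin_cases hm <;> exact absurd hsw (by decide)
        unfold pvRegionOf pvRegionNames
        rw [if_neg hnb]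
        rw [List.find?_cons_of_pos (by simpa using hsw)]
      · have hnb : name ∉ pvBaseNames := by
          intro hm; fin_cases hm <;> exact absurd hsw (by decide)
        unfold pvRegionOf pvRegionNames
        rw [if_neg hnb]
        rw [List.find?_cons_of_neg (by simpa using pv_sw_false hsw ("Africa" ++ "/") (by decide) (by decide))]
        rw [List.find?_cons_of_pos (by simpa using hsw)]
      · have hnb : name ∉ pvBaseNames := by
          intro hm; fin_cases hm <;> exact absurd hsw (by decide)
        unfold pvRegionOf pvRegionNames
        rw [if_neg hnb]
        rw [List.find?_cons_of_neg (by simpa using pv_sw_false hsw ("Africa" ++ "/") (by decide) (by decide))]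
        rw [List.find?_cons_of_neg (by simpa using pv_sw_false hsw ("America" ++ "/") (by decide) (by decide))]
        rw [List.find?_cons_of_pos (by simpa using hsw)]
      · have hnb : name ∉ pvBaseNames := by
          intro hm; fin_cases hm <;> exact absurd hsw (by decide)
        unfold pvRegionOf pvRegionNames
        rw [if_neg hnb]
        rw [List.find?_cons_of_neg (by simpa using pv_sw_false hsw ("Africa" ++ "/") (by decide) (by decide))]
        rw [List.find?_cons_of_neg (by simpa using pv_sw_false hsw ("America" ++ "/") (by decide) (by decide))]
        rw [List.find?_cons_of_neg (by simpa using pv_sw_false hsw ("Antarctica" ++ "/") (by decide) (by decide))]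
        rw [List.find?_cons_of_pos (by simpa using hsw)]
      · have hnb : name ∉ pvBaseNames := by
          intro hm; fin_cases hm <;> exact absurd hsw (by decide)
        unfold pvRegionOf pvRegionNames
        rw [if_neg hnb]
        rw [List.find?_cons_of_neg (by simpa using pv_sw_false hsw ("Africa" ++ "/") (by decide) (by decide))]
        rw [List.find?_cons_of_neg (by simpa using pv_sw_false hsw ("America" ++ "/") (by decide) (by decide))]
        rw [List.find?_cons_of_neg (by simpa using pv_sw_false hsw ("Antarctica" ++ "/") (by decide) (by decide))]
        rw [List.find?_cons_of_neg (by simpa using pv_sw_false hsw ("Asia" ++ "/") (by decide) (by decide))]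
        rw [List.find?_cons_of_pos (by simpa using hsw)]
      · have hnb : name ∉ pvBaseNames := by
          intro hm; fin_cases hm <;> exact absurd hsw (by decide)
        unfold pvRegionOf pvRegionNames
        rw [if_neg hnb]
        rw [List.find?_cons_of_neg (by simpa using pv_sw_false hsw ("Africa" ++ "/") (by decide) (by decide))]
        rw [List.find?_cons_of_neg (by simpa using pv_sw_false hsw ("America" ++ "/") (by decide) (by decide))]
        rw [List.find?_cons_of_neg (by simpa using pv_sw_false hsw ("Antarctica" ++ "/") (by decide) (by decide))]
        rw [List.find?_cons_of_neg (by simpa using pv_sw_false hsw ("Asia" ++ "/") (by decide) (by decide))]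
        rw [List.find?_cons_of_neg (by simpa using pv_sw_false hsw ("Atlantic" ++ "/") (by decide) (by decide))]
        rw [List.find?_cons_of_pos (by simpa using hsw)]
      · have hnb : name ∉ pvBaseNames := by
          intro hm; fin_cases hm <;> exact absurd hsw (by decide)
        unfold pvRegionOf pvRegionNames
        rw [if_neg hnb]
        rw [List.find?_cons_of_neg (by simpa using pv_sw_false hsw ("Africa" ++ "/") (by decide) (by decide))]
        rw [List.find?_cons_of_neg (by simpa using pv_sw_false hsw ("America" ++ "/") (by decide) (by decide))]
        rw [List.find?_cons_of_neg (by simpa using pv_sw_false hsw ("Antarctica" ++ "/") (by decide) (by decide))]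
        rw [List.find?_cons_of_neg (by simpa using pv_sw_false hsw ("Asia" ++ "/") (by decide) (by decide))]
        rw [List.find?_cons_of_neg (by simpa using pv_sw_false hsw ("Atlantic" ++ "/") (by decide) (by decide))]
        rw [List.find?_cons_of_neg (by simpa using pv_sw_false hsw ("Australia" ++ "/") (by decide) (by decide))]
        rw [List.find?_cons_of_pos (by simpa using hsw)]
      · have hnb : name ∉ pvBaseNames := by
          intro hm; fin_cases hm <;> exact absurd hsw (by decide)
        unfold pvRegionOf pvRegionNames
        rw [if_neg hnb]
        rw [List.find?_cons_of_neg (by simpa using pv_sw_false hsw ("Africa" ++ "/") (by decide) (by decide))]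
        rw [List.find?_cons_of_neg (by simpa using pv_sw_false hsw ("America" ++ "/") (by decide) (by decide))]
        rw [List.find?_cons_of_neg (by simpa using pv_sw_false hsw ("Antarctica" ++ "/") (by decide) (by decide))]
        rw [List.find?_cons_of_neg (by simpa using pv_sw_false hsw ("Asia" ++ "/") (by decide) (by decide))]
        rw [List.find?_cons_of_neg (by simpa using pv_sw_false hsw ("Atlantic" ++ "/") (by decide) (by decide))]
        rw [List.find?_cons_of_neg (by simpa using pv_sw_false hsw ("Australia" ++ "/") (by decide) (by decide))]
        rw [List.find?_cons_of_neg (by simpa using pv_sw_false hsw ("Europe" ++ "/") (by decide) (by decide))]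
        rw [List.find?_cons_of_pos (by simpa using hsw)]
      · have hnb : name ∉ pvBaseNames := by
          intro hm; fin_cases hm <;> exact absurd hsw (by decide)
        unfold pvRegionOf pvRegionNames
        rw [if_neg hnb]
        rw [List.find?_cons_of_neg (by simpa using pv_sw_false hsw ("Africa" ++ "/") (by decide) (by decide))]
        rw [List.find?_cons_of_neg (by simpa using pv_sw_false hsw ("America" ++ "/") (by decide) (by decide))]
        rw [List.find?_cons_of_neg (by simpa using pv_sw_false hsw ("Antarctica" ++ "/") (by decide) (by decide))]
        rw [List.find?_cons_of_neg (by simpa using pv_sw_false hsw ("Asia" ++ "/") (by decide) (by decide))]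
        rw [List.find?_cons_of_neg (by simpa using pv_sw_false hsw ("Atlantic" ++ "/") (by decide) (by decide))]
        rw [List.find?_cons_of_neg (by simpa using pv_sw_false hsw ("Australia" ++ "/") (by decide) (by decide))]
        rw [List.find?_cons_of_neg (by simpa using pv_sw_false hsw ("Europe" ++ "/") (by decide) (by decide))]
        rw [List.find?_cons_of_neg (by simpa using pv_sw_false hsw ("Indian" ++ "/") (by decide) (by decide))]
        rw [List.find?_cons_of_pos (by simpa using hsw)]

-- ===== VERDICT (by name: the statement is the Claim_ definition above) =====
theorem organize_by_region_spec : Claim_equal_organize_by_region := by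
  intro tl _
  show organize_by_region tl = organize_by_region_alt tl
  have hA : organize_by_region tl =
      ((tl.foldl pvGStep pvD0).keys.foldl
        (fun d region => d.modify region [] (fun v => PySem.List.sorted v (fun x => toLex x) false))
        (tl.foldl pvGStep pvD0)).items := by
    unfold organize_by_region
    simp only [pvStep_eq]
    rfl
  rw [hA]
  have hcont0 : ∀ k ∈ pvK10, pvD0.contains k = true := by decide
  have hkeys1 : (tl.foldl pvGStep pvD0).keys = pvK10 :=
    (pvLoop_keys tl pvD0 hcont0).trans pvD0_keys
  have hcont1 : ∀ k ∈ pvK10, (tl.foldl pvGStep pvD0).contains k = true := by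
    intro k hk
    rw [PySem.Dict.contains_iff_mem_keys, hkeys1]
    exact hk
  have hkeys2 : ((tl.foldl pvGStep pvD0).keys.foldl
      (fun d region => d.modify region [] (fun v => PySem.List.sorted v (fun x => toLex x) false))
      (tl.foldl pvGStep pvD0)).keys = pvK10 := by
    rw [hkeys1, pvSortLoop_keys _ _ _ hcont1, hkeys1]
  rw [PySem.Dict.items_eq_map_keys _ (by rw [hkeys2]; exact pvK10_nodup) [], hkeys2]
  show pvK10.map _ = pvK10.map _
  refine List.map_congr_left ?_
  intro k hk
  have hbucketA : ((tl.foldl pvGStep pvD0).keys.foldl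
      (fun d region => d.modify region [] (fun v => PySem.List.sorted v (fun x => toLex x) false))
      (tl.foldl pvGStep pvD0)).getD k [] =
      PySem.List.sorted (tl.filter (fun p => pvRegionOf p.1 == some k)) (fun x => toLex x) false := by
    rw [hkeys1, pvSortLoop_getD _ _ _ _ pvK10_nodup, if_pos hk, pvLoop_getD, pvD0_getD,
      List.nil_append]
  rw [hbucketA, List.filter_congr (fun p _ => pvRegionOf_eq_belongs p.1 k hk)]
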